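-- pv_equiv track=rewrite | github.com/icancodefyi/sniffer | services/analysis/engine/discovery.py | _select_domains
-- ===== SOURCE A (Python) =====
-- DEMO_TARGET_DOMAINS = [
--     "fsiblog.pro",
--     "mydesi.ltd",
--     "auntymaza.video",
--     "mydesi.click",
--     "auntymaza.watch",
-- ]
--
-- def _select_domains(rows: list[dict[str, str]]) -> list[dict[str, str]]:
--     selected: list[dict[str, str]] = []
--     by_domain = {row.get("domain", ""): row for row in rows}
--
--     for domain in DEMO_TARGET_DOMAINS:
--         row = by_domain.get(domain)
--         if row is not None:
--             selected.append(row)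
--             continue
--
--         selected.append(
--             {
--                 "domain": domain,
--                 "network": "DemoScope",
--                 "provider_type": "manual_target",
--             }
--         )
--
--     return selected
-- ===== SOURCE B (Python) =====
-- DEMO_TARGET_DOMAINS = [
--     "fsiblog.pro",
--     "mydesi.ltd",
--     "auntymaza.video",
--     "mydesi.click",
--     "auntymaza.watch",
-- ]
--
--
-- def _select_domains(rows: list[dict[str, str]]) -> list[dict[str, str]]:
--     # Seed defaults keyed by target, then override in one pass over rows;
--     # dict insertion order (the target order) makes .values() the answer.
--     result = {
--         d: {"domain": d, "network": "DemoScope", "provider_type": "manual_target"}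
--         for d in DEMO_TARGET_DOMAINS
--     }
--     for row in rows:
--         d = row.get("domain", "")
--         if d in result:
--             result[d] = row
--     return list(result.values())
-- ===== Notes on version B (the rewrite author's own statement) =====
-- stated objective: alternative
-- what changed: A indexes all rows by domain and then loops over the targets looking each up; B seeds a defaults table keyed by the targets, overrides it in place during a single pass over the rows, and returns its values (insertion order = target order).
import Mathlib
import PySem

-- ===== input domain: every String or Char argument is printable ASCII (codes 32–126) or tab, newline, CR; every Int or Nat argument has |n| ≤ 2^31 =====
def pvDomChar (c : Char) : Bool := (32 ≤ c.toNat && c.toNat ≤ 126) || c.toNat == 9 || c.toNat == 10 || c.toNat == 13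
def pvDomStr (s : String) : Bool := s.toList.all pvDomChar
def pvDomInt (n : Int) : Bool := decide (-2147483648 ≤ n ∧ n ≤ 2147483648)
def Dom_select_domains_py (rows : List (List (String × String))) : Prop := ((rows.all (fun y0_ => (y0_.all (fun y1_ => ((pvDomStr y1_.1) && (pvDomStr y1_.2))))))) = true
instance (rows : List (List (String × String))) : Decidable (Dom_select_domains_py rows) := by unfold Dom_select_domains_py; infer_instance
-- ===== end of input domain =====

-- B seeds a defaults table keyed by the targets and overrides it in one pass over the rows,
-- returning its values in insertion (= target) order, instead of indexing the rows first. Same cost; alternative decomposition.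

def pvTargets : List String :=
  ["fsiblog.pro", "mydesi.ltd", "auntymaza.video", "mydesi.click", "auntymaza.watch"]

-- row.get("domain", "")
def pvRowDomain (row : List (String × String)) : String :=
  (PySem.Dict.mk row).getD "domain" ""

def pvDefaultRow (domain : String) : List (String × String) :=
  [("domain", domain), ("network", "DemoScope"), ("provider_type", "manual_target")]

-- ===== PORT A =====
def select_domains_py (rows : List (List (String × String))) : List (List (String × String)) :=
  let by_domain : PySem.Dict String (List (String × String)) :=
    rows.foldl (fun d row => d.insert (pvRowDomain row) row) PySem.Dict.empty
  pvTargets.foldl (fun selected domain =>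
    match by_domain.get? domain with
    | some row => selected ++ [row]
    | none => selected ++ [pvDefaultRow domain]) []

-- ===== PORT B =====
def select_domains_py_alt (rows : List (List (String × String))) : List (List (String × String)) :=
  let result0 : PySem.Dict String (List (String × String)) :=
    pvTargets.foldl (fun d t => d.insert t (pvDefaultRow t)) PySem.Dict.empty
  let result := rows.foldl (fun d row =>
    let dm := pvRowDomain row
    if d.contains dm then d.insert dm row else d) result0
  result.values

-- ===== PRECONDITION & SPEC =====
def Spec_select_domains_py (rows : List (List (String × String))) (out : List (List (String × String))) : Prop := out = select_domains_py_alt rows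
instance (rows : List (List (String × String))) (out : List (List (String × String))) : Decidable (Spec_select_domains_py rows out) := by unfold Spec_select_domains_py; infer_instance

-- ===== CLAIM (what is proved, stated in full; the proofs are below) =====
def Claim_equal_select_domains_py : Prop := ∀ (rows : List (List (String × String))), Dom_select_domains_py rows → Spec_select_domains_py rows (select_domains_py rows)

-- ===== LEMMAS AND PROOFS =====

-- A's output loop, for an arbitrary index dict m, is a map over the targets.
theorem pv_a_loop (m : PySem.Dict String (List (String × String))) (ts : List String)
    (acc : List (List (String × String))) :
    ts.foldl (fun selected domain =>
      match m.get? domain with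
      | some row => selected ++ [row]
      | none => selected ++ [pvDefaultRow domain]) acc
    = acc ++ ts.map (fun t => (m.get? t).getD (pvDefaultRow t)) := by
  induction ts generalizing acc with
  | nil => simp
  | cons t ts ih =>
    simp only [List.foldl_cons, List.map_cons, ih]
    cases m.get? t <;> simp

-- B's loop invariant: if mB's items are the targets paired with mA's lookup-or-default,
-- the relation is preserved by processing the rows on both sides.
theorem pv_inv (rows : List (List (String × String)))
    (mA mB : PySem.Dict String (List (String × String)))
    (h : mB.items = pvTargets.map (fun t => (t, (mA.get? t).getD (pvDefaultRow t)))) :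
    (rows.foldl (fun d row =>
        let dm := pvRowDomain row
        if d.contains dm then d.insert dm row else d) mB).items
    = pvTargets.map (fun t =>
        (t, ((rows.foldl (fun d row => d.insert (pvRowDomain row) row) mA).get? t).getD (pvDefaultRow t))) := by
  induction rows generalizing mA mB with
  | nil => exact h
  | cons row rows ih =>
    simp only [List.foldl_cons]
    apply ih
    have hkeys : mB.keys = pvTargets := by
      simp [PySem.Dict.keys, h, List.map_map, Function.comp_def]
    have hcont : mB.contains (pvRowDomain row) = decide (pvRowDomain row ∈ pvTargets) := by
      rw [PySem.Dict.contains_eq_decide_mem_keys, hkeys]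
    by_cases hmem : pvRowDomain row ∈ pvTargets
    · simp only [hcont, hmem, decide_true, if_true]
      rw [PySem.Dict.items_insert_of_contains _ row (by rw [hcont]; simpa), h, List.map_map]
      apply List.map_congr_left
      intro t _
      by_cases ht : t = pvRowDomain row
      · subst ht
        simp [PySem.Dict.get?_insert_self]
      · simp [beq_iff_eq, ht, PySem.Dict.get?_insert_of_ne _ _ ht]
    · rw [if_neg (by simp [hcont, hmem]), h]
      apply List.map_congr_left
      intro t htm
      have ht : t ≠ pvRowDomain row := fun he => hmem (he ▸ htm)
      rw [PySem.Dict.get?_insert_of_ne _ _ ht]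

-- ===== VERDICT (by name: the statement is the Claim_ definition above) =====
theorem select_domains_py_spec : Claim_equal_select_domains_py := by
  intro rows _
  show select_domains_py rows = select_domains_py_alt rows
  unfold select_domains_py select_domains_py_alt
  rw [pv_a_loop]
  rw [PySem.Dict.values, pv_inv rows PySem.Dict.empty _ (by decide), List.map_map]
  simp
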